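-- pv_equiv track=rewrite | github.com/Neshri/Introspection | testtest.py | simulate_gridbot
-- ===== SOURCE A (Python) =====
-- def simulate_gridbot(initial_state, instructions):
--   """
--   Simulates a gridbot on a 10x10 grid.
--   If the robot is out of bounds, the move is ignored, and the robot remains in its current position,
--   continuing with the next instruction.
--   Args:
--   initial_state: A tuple (x, y, direction) representing the robot's initial state.
--   instructions: A string of instructions ('R', 'L', 'F').
--   Returns:
--   A tuple (x, y, direction) representing the robot's final state.
--   """
--   x, y, direction = initial_state
--   for instruction in instructions:
--     if instruction == 'R':
--       if direction == 'N':
--         direction = 'E'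
--       elif direction == 'E':
--         direction = 'S'
--       elif direction == 'S':
--         direction = 'W'
--       elif direction == 'W':
--         direction = 'N'
--     elif instruction == 'L':
--       if direction == 'N':
--         direction = 'W'
--       elif direction == 'E':
--         direction = 'N'
--       elif direction == 'S':
--         direction = 'E'
--       elif direction == 'W':
--         direction = 'S'
--     elif instruction == 'F':
--       if x >= 0 and x <= 9 and y >= 0 and y <= 9:
--         if direction == 'N':
--           y += 1
--         elif direction == 'E':
--           x += 1
--         elif direction == 'S':
--           y -= 1
--         elif direction == 'W':
--           x -= 1
--       else:
--         # Move is out of bounds, ignore it and continue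
--         pass  # No return statement here
--     else:
--       # Invalid instruction, ignore it and continue
--       pass # No return statement here
--   return (x, y, direction)
-- ===== SOURCE B (Python) =====
-- def simulate_gridbot(initial_state, instructions):
--     x, y, d = initial_state
--     order = 'NESW'
--     if d not in ('N', 'E', 'S', 'W'):
--         # unknown direction: every branch of the simulation is a no-op
--         return initial_state
--     # pass 1: track only the direction index; record it at each 'F'
--     j = order.index(d)
--     moves = []
--     for c in instructions:
--         if c == 'R':
--             j = (j + 1) % 4
--         elif c == 'L':
--             j = (j + 3) % 4
--         elif c == 'F':
--             moves.append(j)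
--     # pass 2: apply the recorded moves; once the robot is out of bounds
--     # it never moves again, so we can stop early
--     deltas = ((0, 1), (1, 0), (0, -1), (-1, 0))
--     for k in moves:
--         if not (0 <= x <= 9 and 0 <= y <= 9):
--             break
--         dx, dy = deltas[k]
--         x += dx
--         y += dy
--     return (x, y, order[j])
-- ===== Notes on version B (the rewrite author's own statement) =====
-- stated objective: alternative
-- what changed: Splits A's single interleaved simulation into two staged passes: a first pass over the instructions tracks only the direction (as an index into the cycle NESW) and records the direction at each 'F', giving the final direction; a second pass replays only the recorded moves and stops at the first out-of-bounds position, which is correct because an out-of-bounds robot never moves again.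
import Mathlib
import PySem

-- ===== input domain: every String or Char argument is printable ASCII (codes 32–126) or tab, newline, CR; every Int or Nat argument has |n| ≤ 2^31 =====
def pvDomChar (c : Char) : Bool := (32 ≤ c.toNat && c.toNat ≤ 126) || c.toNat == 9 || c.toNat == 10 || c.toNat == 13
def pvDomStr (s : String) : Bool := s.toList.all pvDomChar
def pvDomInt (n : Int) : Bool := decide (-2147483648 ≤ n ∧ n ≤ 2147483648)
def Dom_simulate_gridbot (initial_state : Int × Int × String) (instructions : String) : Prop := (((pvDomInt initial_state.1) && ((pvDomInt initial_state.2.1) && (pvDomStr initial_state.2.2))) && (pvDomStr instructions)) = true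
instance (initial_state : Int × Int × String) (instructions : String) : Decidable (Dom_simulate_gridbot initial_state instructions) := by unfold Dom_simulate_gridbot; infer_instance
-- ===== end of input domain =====

-- B restructures A's single interleaved simulation into two staged passes
-- (direction trajectory first, then movement with early stop); no speed claim.


-- ===== PORT A =====
-- one iteration of A's for-loop, branch for branch
def gbStepA (s : Int × Int × String) (c : Char) : Int × Int × String :=
  let (x, y, direction) := s
  if c = 'R' then
    if direction = "N" then (x, y, "E")
    else if direction = "E" then (x, y, "S")
    else if direction = "S" then (x, y, "W")
    else if direction = "W" then (x, y, "N")
    else (x, y, direction)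
  else if c = 'L' then
    if direction = "N" then (x, y, "W")
    else if direction = "E" then (x, y, "N")
    else if direction = "S" then (x, y, "E")
    else if direction = "W" then (x, y, "S")
    else (x, y, direction)
  else if c = 'F' then
    if 0 ≤ x ∧ x ≤ 9 ∧ 0 ≤ y ∧ y ≤ 9 then
      if direction = "N" then (x, y + 1, direction)
      else if direction = "E" then (x + 1, y, direction)
      else if direction = "S" then (x, y - 1, direction)
      else if direction = "W" then (x - 1, y, direction)
      else (x, y, direction)
    else (x, y, direction)
  else (x, y, direction)

def simulate_gridbot (initial_state : Int × Int × String) (instructions : String) : Int × Int × String :=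
  let (x, y, direction) := initial_state
  instructions.toList.foldl gbStepA (x, y, direction)

-- ===== PORT B =====
-- 'NESW'[j]
def gbDir (j : Nat) : String := (["N", "E", "S", "W"] : List String).getD j ""

-- pass 1 of B: one instruction updating (direction index, recorded moves)
def gbTurn (s : Nat × List Nat) (c : Char) : Nat × List Nat :=
  let (j, ms) := s
  if c = 'R' then ((j + 1) % 4, ms)
  else if c = 'L' then ((j + 3) % 4, ms)
  else if c = 'F' then (j, ms ++ [j])
  else (j, ms)

-- pass 2 of B: apply the recorded moves, stopping at the first out-of-bounds position
def gbMove : Int × Int → List Nat → Int × Int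
  | p, [] => p
  | (x, y), k :: ks =>
    if ¬ (0 ≤ x ∧ x ≤ 9 ∧ 0 ≤ y ∧ y ≤ 9) then (x, y)
    else
      let (dx, dy) := ([(0, 1), (1, 0), (0, -1), (-1, 0)] : List (Int × Int)).getD k (0, 0)
      gbMove (x + dx, y + dy) ks

def simulate_gridbot_alt (initial_state : Int × Int × String) (instructions : String) : Int × Int × String :=
  let (x, y, d) := initial_state
  if d = "N" ∨ d = "E" ∨ d = "S" ∨ d = "W" then
    -- 'NESW'.index(d), guarded by the membership test above
    let j0 : Nat := if d = "N" then 0 else if d = "E" then 1 else if d = "S" then 2 else 3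
    let (j, moves) := instructions.toList.foldl gbTurn (j0, [])
    let (x', y') := gbMove (x, y) moves
    (x', y', gbDir j)
  else initial_state

-- ===== PRECONDITION & SPEC =====
def Spec_simulate_gridbot (initial_state : Int × Int × String) (instructions : String) (out : Int × Int × String) : Prop := out = simulate_gridbot_alt initial_state instructions
instance (initial_state : Int × Int × String) (instructions : String) (out : Int × Int × String) : Decidable (Spec_simulate_gridbot initial_state instructions out) := by unfold Spec_simulate_gridbot; infer_instance

-- ===== CLAIM (what is proved, stated in full; the proofs are below) =====
def Claim_equal_simulate_gridbot : Prop := ∀ (initial_state : Int × Int × String) (instructions : String), Dom_simulate_gridbot initial_state instructions → Spec_simulate_gridbot initial_state instructions (simulate_gridbot initial_state instructions)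

-- ===== LEMMAS AND PROOFS =====
-- A's step is a no-op on a direction outside NESW
theorem gbStepA_invalid (x y : Int) (d : String)
    (h : ¬ (d = "N" ∨ d = "E" ∨ d = "S" ∨ d = "W")) (c : Char) :
    gbStepA (x, y, d) c = (x, y, d) := by
  simp only [not_or] at h
  obtain ⟨h1, h2, h3, h4⟩ := h
  simp [gbStepA, h1, h2, h3, h4]

theorem gbFoldA_invalid (l : List Char) (x y : Int) (d : String)
    (h : ¬ (d = "N" ∨ d = "E" ∨ d = "S" ∨ d = "W")) :
    l.foldl gbStepA (x, y, d) = (x, y, d) := by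
  induction l with
  | nil => rfl
  | cons c t ih => simp [List.foldl, gbStepA_invalid x y d h c, ih]

-- out of bounds: pass 2 leaves the position unchanged
theorem gbMove_oob (x y : Int) (ms : List Nat)
    (h : ¬ (0 ≤ x ∧ x ≤ 9 ∧ 0 ≤ y ∧ y ≤ 9)) :
    gbMove (x, y) ms = (x, y) := by
  cases ms with
  | nil => rfl
  | cons k ks => simp [gbMove, h]

-- pass 1's accumulator only grows: starting from ms it appends what it produces from []
theorem gbTurn_acc (l : List Char) (j : Nat) (ms : List Nat) :
    l.foldl gbTurn (j, ms) =
      ((l.foldl gbTurn (j, [])).1, ms ++ (l.foldl gbTurn (j, [])).2) := by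
  induction l generalizing j ms with
  | nil => simp
  | cons c t ih =>
      rw [List.foldl_cons, List.foldl_cons]
      by_cases hR : c = 'R'
      · have h1 : ∀ a : List Nat, gbTurn (j, a) c = ((j + 1) % 4, a) := by
          intro a; simp [gbTurn, hR]
        rw [h1, h1]; exact ih _ ms
      · by_cases hL : c = 'L'
        · have h1 : ∀ a : List Nat, gbTurn (j, a) c = ((j + 3) % 4, a) := by
            intro a; simp [gbTurn, hL]
          rw [h1, h1]; exact ih _ ms
        · by_cases hF : c = 'F'
          · have h1 : ∀ a : List Nat, gbTurn (j, a) c = (j, a ++ [j]) := by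
              intro a; simp [gbTurn, hF]
            rw [h1, h1]
            simp only [List.nil_append]
            rw [ih j (ms ++ [j]), ih j [j]]
            simp
          · have h1 : ∀ a : List Nat, gbTurn (j, a) c = (j, a) := by
              intro a; simp [gbTurn, hR, hL, hF]
            rw [h1, h1]; exact ih _ ms

-- the core: A's interleaved fold equals B's two staged passes
theorem gb_main (l : List Char) (x y : Int) (idx : Nat) (hidx : idx < 4) :
    l.foldl gbStepA (x, y, gbDir idx) =
      ((gbMove (x, y) (l.foldl gbTurn (idx, [])).2).1,
       (gbMove (x, y) (l.foldl gbTurn (idx, [])).2).2,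
       gbDir (l.foldl gbTurn (idx, [])).1) := by
  induction l generalizing x y idx with
  | nil => rfl
  | cons c t ih =>
      rw [List.foldl_cons, List.foldl_cons]
      by_cases hR : c = 'R'
      · have h1 : gbTurn (idx, []) c = ((idx + 1) % 4, []) := by simp [gbTurn, hR]
        have h2 : gbStepA (x, y, gbDir idx) c = (x, y, gbDir ((idx + 1) % 4)) := by
          subst hR; interval_cases idx <;> simp [gbStepA, gbDir]
        rw [h1, h2]
        exact ih x y _ (Nat.mod_lt _ (by norm_num))
      · by_cases hL : c = 'L'
        · have h1 : gbTurn (idx, []) c = ((idx + 3) % 4, []) := by simp [gbTurn, hL]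
          have h2 : gbStepA (x, y, gbDir idx) c = (x, y, gbDir ((idx + 3) % 4)) := by
            subst hL; interval_cases idx <;> simp [gbStepA, gbDir]
          rw [h1, h2]
          exact ih x y _ (Nat.mod_lt _ (by norm_num))
        · by_cases hF : c = 'F'
          · have h1 : gbTurn (idx, []) c = (idx, [idx]) := by simp [gbTurn, hF]
            rw [h1, gbTurn_acc t idx [idx]]
            simp only [List.singleton_append]
            by_cases hb : 0 ≤ x ∧ x ≤ 9 ∧ 0 ≤ y ∧ y ≤ 9
            · subst hF
              interval_cases idx
              · have h2 : gbStepA (x, y, gbDir 0) 'F' = (x, y + 1, gbDir 0) := by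
                  simp [gbStepA, gbDir, hb]
                have h3 : ∀ s : List Nat, gbMove (x, y) (0 :: s) = gbMove (x, y + 1) s := by
                  intro s; simp [gbMove, hb]
                rw [h2, h3]; exact ih x (y + 1) 0 (by norm_num)
              · have h2 : gbStepA (x, y, gbDir 1) 'F' = (x + 1, y, gbDir 1) := by
                  simp [gbStepA, gbDir, hb]
                have h3 : ∀ s : List Nat, gbMove (x, y) (1 :: s) = gbMove (x + 1, y) s := by
                  intro s; simp [gbMove, hb]
                rw [h2, h3]; exact ih (x + 1) y 1 (by norm_num)
              · have h2 : gbStepA (x, y, gbDir 2) 'F' = (x, y - 1, gbDir 2) := by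
                  simp [gbStepA, gbDir, hb]
                have h3 : ∀ s : List Nat, gbMove (x, y) (2 :: s) = gbMove (x, y - 1) s := by
                  intro s; simp [gbMove, hb, sub_eq_add_neg]
                rw [h2, h3]; exact ih x (y - 1) 2 (by norm_num)
              · have h2 : gbStepA (x, y, gbDir 3) 'F' = (x - 1, y, gbDir 3) := by
                  simp [gbStepA, gbDir, hb]
                have h3 : ∀ s : List Nat, gbMove (x, y) (3 :: s) = gbMove (x - 1, y) s := by
                  intro s; simp [gbMove, hb, sub_eq_add_neg]
                rw [h2, h3]; exact ih (x - 1) y 3 (by norm_num)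
            · have h2 : gbStepA (x, y, gbDir idx) c = (x, y, gbDir idx) := by
                subst hF; simp [gbStepA, hb]
              have h3 : ∀ s : List Nat, gbMove (x, y) (idx :: s) = (x, y) := by
                intro s; simp [gbMove, hb]
              rw [h2, h3, ih x y idx hidx, gbMove_oob x y _ hb]
          · have h1 : gbTurn (idx, []) c = (idx, []) := by simp [gbTurn, hR, hL, hF]
            have h2 : gbStepA (x, y, gbDir idx) c = (x, y, gbDir idx) := by
              interval_cases idx <;> simp [gbStepA, gbDir, hR, hL, hF]
            rw [h1, h2]; exact ih x y idx hidx

-- ===== VERDICT (by name: the statement is the Claim_ definition above) =====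
theorem simulate_gridbot_spec : Claim_equal_simulate_gridbot := by
  intro initial_state instructions _
  obtain ⟨x, y, d⟩ := initial_state
  unfold Spec_simulate_gridbot simulate_gridbot simulate_gridbot_alt
  dsimp only
  by_cases h : d = "N" ∨ d = "E" ∨ d = "S" ∨ d = "W"
  · rw [if_pos h]
    rcases h with h | h | h | h <;> subst h <;> (try simp only [reduceIte])
    · have hm := gb_main instructions.toList x y 0 (by norm_num)
      rcases hp : List.foldl gbTurn (0, []) instructions.toList with ⟨j, ms⟩
      rw [hp] at hm
      rcases hq : gbMove (x, y) ms with ⟨x', y'⟩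
      rw [hq] at hm
      simpa [gbDir, hp, hq] using hm
    · have hm := gb_main instructions.toList x y 1 (by norm_num)
      rcases hp : List.foldl gbTurn (1, []) instructions.toList with ⟨j, ms⟩
      rw [hp] at hm
      rcases hq : gbMove (x, y) ms with ⟨x', y'⟩
      rw [hq] at hm
      simpa [gbDir, hp, hq] using hm
    · have hm := gb_main instructions.toList x y 2 (by norm_num)
      rcases hp : List.foldl gbTurn (2, []) instructions.toList with ⟨j, ms⟩
      rw [hp] at hm
      rcases hq : gbMove (x, y) ms with ⟨x', y'⟩
      rw [hq] at hm
      simpa [gbDir, hp, hq] using hm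
    · have hm := gb_main instructions.toList x y 3 (by norm_num)
      rcases hp : List.foldl gbTurn (3, []) instructions.toList with ⟨j, ms⟩
      rw [hp] at hm
      rcases hq : gbMove (x, y) ms with ⟨x', y'⟩
      rw [hq] at hm
      simpa [gbDir, hp, hq] using hm
  · rw [if_neg h]
    exact gbFoldA_invalid instructions.toList x y d h
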